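-- pv_equiv track=rewrite | github.com/snowraph/Whackabot | whackabot.py | format_methods
-- ===== SOURCE A (Python) =====
-- def format_methods(methods):
--     m = [0, 0, 0, 0] # get, post, head, other
--     for k, v in methods.items():
--         if   k == 'get': m[0] = v
--         elif k == 'post': m[1] = v
--         elif k == 'head': m[2] = v
--         else: m[3] += v
--     return '/'.join(map(str, m))
-- ===== SOURCE B (Python) =====
-- def format_methods(methods):
--     keys = ('get', 'post', 'head')
--
--     def slot(k):
--         return keys.index(k) if k in keys else 3
--
--     # Dict keys are unique, so each of slots 0-2 sums at most one value;
--     # all four answers become one uniform per-slot aggregation.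
--     return '/'.join(str(sum(v for k, v in methods.items() if slot(k) == i))
--                     for i in range(4))
-- ===== Notes on version B (the rewrite author's own statement) =====
-- stated objective: alternative
-- what changed: Replaces the branching 4-slot accumulator with a uniform classification function slot(k) and four per-slot filtered sums, relying on dict-key uniqueness for the named slots.
import Mathlib
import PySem

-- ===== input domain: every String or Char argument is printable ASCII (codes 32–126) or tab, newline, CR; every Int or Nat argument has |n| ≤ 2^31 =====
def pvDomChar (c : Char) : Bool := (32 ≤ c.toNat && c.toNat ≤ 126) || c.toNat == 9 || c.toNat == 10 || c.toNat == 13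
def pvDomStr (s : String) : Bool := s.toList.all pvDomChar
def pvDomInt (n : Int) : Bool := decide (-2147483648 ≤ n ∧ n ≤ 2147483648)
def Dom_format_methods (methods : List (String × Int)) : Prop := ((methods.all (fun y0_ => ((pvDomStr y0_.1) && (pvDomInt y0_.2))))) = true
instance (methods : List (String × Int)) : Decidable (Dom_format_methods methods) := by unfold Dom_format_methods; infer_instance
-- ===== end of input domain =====

-- B replaces A's branching 4-slot accumulator with a uniform slot classifier and four per-slot filtered sums (alternative decomposition, same O(n) cost).


-- ===== PORT A =====
-- one loop step of A: overwrite the get/post/head slot, accumulate the 'other' slot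
def fmStep (m : Int × Int × Int × Int) (kv : String × Int) : Int × Int × Int × Int :=
  if kv.1 = "get" then (kv.2, m.2.1, m.2.2.1, m.2.2.2)
  else if kv.1 = "post" then (m.1, kv.2, m.2.2.1, m.2.2.2)
  else if kv.1 = "head" then (m.1, m.2.1, kv.2, m.2.2.2)
  else (m.1, m.2.1, m.2.2.1, m.2.2.2 + kv.2)

def format_methods (methods : List (String × Int)) : String :=
  let m := methods.foldl fmStep (0, 0, 0, 0)
  PySem.Str.join "/" [PySem.Int.toStr m.1, PySem.Int.toStr m.2.1,
                      PySem.Int.toStr m.2.2.1, PySem.Int.toStr m.2.2.2]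

-- ===== PORT B =====
-- keys = ('get', 'post', 'head')
def fmKeys : List String := ["get", "post", "head"]

-- slot(k) = keys.index(k) if k in keys else 3
def fmSlot (k : String) : Int :=
  if k ∈ fmKeys then (((PySem.List.index? fmKeys k).getD 0 : Nat) : Int) else 3

-- sum(v for k, v in methods.items() if slot(k) == i)
def fmSum (methods : List (String × Int)) (i : Int) : Int :=
  (methods.filter (fun p => fmSlot p.1 == i)).foldl (fun s p => s + p.2) 0

def format_methods_alt (methods : List (String × Int)) : String :=
  PySem.Str.join "/"
    ((PySem.List.pyRange 0 4 1).map (fun i => PySem.Int.toStr (fmSum methods i)))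

-- ===== PRECONDITION & SPEC =====
-- Pre_ restricts the association list to distinct keys — exactly what a Python dict argument guarantees,
-- so no input the Python A accepts is excluded.
def Pre_format_methods (methods : List (String × Int)) : Prop := (methods.map Prod.fst).Nodup
instance (methods : List (String × Int)) : Decidable (Pre_format_methods methods) := by
  unfold Pre_format_methods; infer_instance
def pvWitness_format_methods : (List (String × Int)) := [("get", 3), ("x", 2), ("head", 1)]

def Spec_format_methods (methods : List (String × Int)) (out : String) : Prop := out = format_methods_alt methods
instance (methods : List (String × Int)) (out : String) : Decidable (Spec_format_methods methods out) := by unfold Spec_format_methods; infer_instance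

-- ===== CLAIM (what is proved, stated in full; the proofs are below) =====
def Claim_equal_format_methods : Prop := ∀ (methods : List (String × Int)), Dom_format_methods methods → Pre_format_methods methods → Spec_format_methods methods (format_methods methods)

-- ===== LEMMAS AND PROOFS =====
theorem fmSlot_get : fmSlot "get" = 0 := by decide
theorem fmSlot_post : fmSlot "post" = 1 := by decide
theorem fmSlot_head : fmSlot "head" = 2 := by decide
theorem fmSlot_other (k : String) (hg : k ≠ "get") (hp : k ≠ "post") (hh : k ≠ "head") :
    fmSlot k = 3 := by
  unfold fmSlot fmKeys
  rw [if_neg]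
  simp [hg, hp, hh]

theorem fmSlot_eq_zero_iff (k : String) : fmSlot k = 0 ↔ k = "get" := by
  constructor
  · intro h
    by_contra hg
    by_cases hp : k = "post"
    · subst hp; simp [fmSlot_post] at h
    · by_cases hh : k = "head"
      · subst hh; simp [fmSlot_head] at h
      · rw [fmSlot_other k hg hp hh] at h; omega
  · intro h; subst h; exact fmSlot_get

theorem fmSlot_eq_one_iff (k : String) : fmSlot k = 1 ↔ k = "post" := by
  constructor
  · intro h
    by_contra hp
    by_cases hg : k = "get"
    · subst hg; simp [fmSlot_get] at h
    · by_cases hh : k = "head"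
      · subst hh; simp [fmSlot_head] at h
      · rw [fmSlot_other k hg hp hh] at h; omega
  · intro h; subst h; exact fmSlot_post

theorem fmSlot_eq_two_iff (k : String) : fmSlot k = 2 ↔ k = "head" := by
  constructor
  · intro h
    by_contra hh
    by_cases hg : k = "get"
    · subst hg; simp [fmSlot_get] at h
    · by_cases hp : k = "post"
      · subst hp; simp [fmSlot_post] at h
      · rw [fmSlot_other k hg hp hh] at h; omega
  · intro h; subst h; exact fmSlot_head

theorem fmSum_zero_of_not_mem (l : List (String × Int)) (key : String) (i : Int)
    (hiff : ∀ k, fmSlot k = i ↔ k = key) (h : key ∉ l.map Prod.fst) : fmSum l i = 0 := by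
  induction l with
  | nil => rfl
  | cons p t ih =>
    simp only [List.map_cons, List.mem_cons, not_or] at h
    unfold fmSum
    rw [List.filter_cons, if_neg]
    · exact ih h.2
    · simp only [beq_iff_eq, hiff]; exact fun e => h.1 e.symm

theorem foldl_add_shift (l : List (String × Int)) (d : Int) :
    l.foldl (fun s p => s + p.2) d = d + l.foldl (fun s p => s + p.2) 0 := by
  induction l generalizing d with
  | nil => simp
  | cons p t ih => simp only [List.foldl_cons]; rw [ih (d + p.2), ih (0 + p.2)]; ring

theorem fmSum_cons_hit (k : String) (v : Int) (t : List (String × Int)) (i : Int)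
    (h : fmSlot k = i) : fmSum ((k, v) :: t) i = v + fmSum t i := by
  unfold fmSum
  rw [List.filter_cons, if_pos (by simpa using h), List.foldl_cons]
  simpa using foldl_add_shift (t.filter (fun p => fmSlot p.1 == i)) (0 + v)

theorem fmSum_cons_miss (k : String) (v : Int) (t : List (String × Int)) (i : Int)
    (h : fmSlot k ≠ i) : fmSum ((k, v) :: t) i = fmSum t i := by
  unfold fmSum
  rw [List.filter_cons, if_neg (by simpa using h)]

theorem foldA_eq (l : List (String × Int)) (hnd : (l.map Prod.fst).Nodup)
    (a b c d : Int) :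
    l.foldl fmStep (a, b, c, d) =
      ((if "get" ∈ l.map Prod.fst then fmSum l 0 else a),
       (if "post" ∈ l.map Prod.fst then fmSum l 1 else b),
       (if "head" ∈ l.map Prod.fst then fmSum l 2 else c),
       d + fmSum l 3) := by
  induction l generalizing a b c d with
  | nil => simp [fmSum]
  | cons p t ih =>
    obtain ⟨k, v⟩ := p
    simp only [List.map_cons, List.nodup_cons] at hnd
    obtain ⟨hk, hnd'⟩ := hnd
    by_cases hg : k = "get"
    · subst hg
      rw [List.foldl_cons,
          show fmStep (a, b, c, d) ("get", v) = (v, b, c, d) from rfl,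
          ih hnd' v b c d,
          fmSum_cons_hit _ v t 0 fmSlot_get,
          fmSum_cons_miss _ v t 1 (by simp [fmSlot_get]),
          fmSum_cons_miss _ v t 2 (by simp [fmSlot_get]),
          fmSum_cons_miss _ v t 3 (by simp [fmSlot_get]),
          fmSum_zero_of_not_mem t "get" 0 fmSlot_eq_zero_iff hk]
      by_cases h1 : "post" ∈ t.map Prod.fst <;> by_cases h2 : "head" ∈ t.map Prod.fst <;>
        simp [hk, h1, h2, List.mem_cons, show "post" ≠ "get" from by decide,
              show "head" ≠ "get" from by decide]
    · by_cases hp : k = "post"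
      · subst hp
        rw [List.foldl_cons,
            show fmStep (a, b, c, d) ("post", v) = (a, v, c, d) from rfl,
            ih hnd' a v c d,
            fmSum_cons_miss _ v t 0 (by simp [fmSlot_post]),
            fmSum_cons_hit _ v t 1 fmSlot_post,
            fmSum_cons_miss _ v t 2 (by simp [fmSlot_post]),
            fmSum_cons_miss _ v t 3 (by simp [fmSlot_post]),
            fmSum_zero_of_not_mem t "post" 1 fmSlot_eq_one_iff hk]
        by_cases h1 : "get" ∈ t.map Prod.fst <;> by_cases h2 : "head" ∈ t.map Prod.fst <;>
          simp [hk, h1, h2, List.mem_cons, show "get" ≠ "post" from by decide,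
                show "head" ≠ "post" from by decide]
      · by_cases hh : k = "head"
        · subst hh
          rw [List.foldl_cons,
              show fmStep (a, b, c, d) ("head", v) = (a, b, v, d) from rfl,
              ih hnd' a b v d,
              fmSum_cons_miss _ v t 0 (by simp [fmSlot_head]),
              fmSum_cons_miss _ v t 1 (by simp [fmSlot_head]),
              fmSum_cons_hit _ v t 2 fmSlot_head,
              fmSum_cons_miss _ v t 3 (by simp [fmSlot_head]),
              fmSum_zero_of_not_mem t "head" 2 fmSlot_eq_two_iff hk]
          by_cases h1 : "get" ∈ t.map Prod.fst <;> by_cases h2 : "post" ∈ t.map Prod.fst <;>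
            simp [hk, h1, h2, List.mem_cons, show "get" ≠ "head" from by decide,
                  show "post" ≠ "head" from by decide]
        · have h3 := fmSlot_other k hg hp hh
          rw [List.foldl_cons,
              show fmStep (a, b, c, d) (k, v) = (a, b, c, d + v) from by
                simp [fmStep, hg, hp, hh],
              ih hnd' a b c (d + v),
              fmSum_cons_miss _ v t 0 (by simp [h3]),
              fmSum_cons_miss _ v t 1 (by simp [h3]),
              fmSum_cons_hit _ v t 3 h3,
              fmSum_cons_miss _ v t 2 (by simp [h3])]
          simp only [List.map_cons, List.mem_cons, Ne.symm hg, Ne.symm hp, Ne.symm hh,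
                     false_or, Prod.mk.injEq]
          exact ⟨trivial, trivial, trivial, by ring⟩

-- ===== VERDICT (by name: the statement is the Claim_ definition above) =====
theorem format_methods_spec : Claim_equal_format_methods := by
  intro methods _ hpre
  unfold Spec_format_methods format_methods format_methods_alt
  rw [foldA_eq methods hpre 0 0 0 0,
      show PySem.List.pyRange 0 4 1 = [0, 1, 2, 3] from by decide]
  by_cases hg : "get" ∈ methods.map Prod.fst <;>
    by_cases hp : "post" ∈ methods.map Prod.fst <;>
      by_cases hh : "head" ∈ methods.map Prod.fst <;>
        simp [hg, hp, hh, fmSum_zero_of_not_mem methods "get" 0 fmSlot_eq_zero_iff,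
              fmSum_zero_of_not_mem methods "post" 1 fmSlot_eq_one_iff,
              fmSum_zero_of_not_mem methods "head" 2 fmSlot_eq_two_iff]
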